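-- pv_equiv track=rewrite | github.com/wherby/code | questions/others/c234/q4.py | maxNiceDivisors
-- ===== SOURCE A (Python) =====
-- def maxNiceDivisors(primeFactors):
--     """
--     :type primeFactors: int
--     :rtype: int
--     """
--     def nearK(n):
--         n3 = n //3
--         n = n % 3
--         n2=0
--         if n ==1 and n3>0:
--             n3-=1
--             n2=2
--         if n ==2:
--             n2 =1
--         return (n2,n3)
--     n2,n3 =nearK(primeFactors)
--     mod = 10**9 +7
--     def quickPow(x,y):
--         ret =1
--         cur = x
--         while y >0:
--             if y & 1:
--                 ret = ret * cur % mod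
--             cur = cur *cur % mod
--             y = y //2
--         return ret
--     res = quickPow(3,n3)
--     r2 =quickPow(2,n2)
--     res =res *r2 %mod
--     return res
-- ===== SOURCE B (Python) =====
-- MOD = 10**9 + 7
--
-- def _powmod(b, e):
--     # b^e mod MOD; 1 for e <= 0 (base case of the recursion)
--     if e <= 0:
--         return 1
--     h = _powmod(b * b % MOD, e // 2)
--     return h * b % MOD if e % 2 else h
--
-- def maxNiceDivisors(primeFactors):
--     q, r = divmod(primeFactors, 3)
--     if r == 1 and q > 0:
--         return 4 * _powmod(3, q - 1) % MOD
--     if r == 2: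
--         return 2 * _powmod(3, q) % MOD
--     return _powmod(3, q)
-- ===== Notes on version B (the rewrite author's own statement) =====
-- stated objective: simpler
-- what changed: Replaces the nearK tuple helper plus iterative while-loop binary exponentiation with a divmod-based early-return chain over the three residues and a short recursive square-and-multiply helper whose base case naturally handles nonpositive exponents.
import Mathlib
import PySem

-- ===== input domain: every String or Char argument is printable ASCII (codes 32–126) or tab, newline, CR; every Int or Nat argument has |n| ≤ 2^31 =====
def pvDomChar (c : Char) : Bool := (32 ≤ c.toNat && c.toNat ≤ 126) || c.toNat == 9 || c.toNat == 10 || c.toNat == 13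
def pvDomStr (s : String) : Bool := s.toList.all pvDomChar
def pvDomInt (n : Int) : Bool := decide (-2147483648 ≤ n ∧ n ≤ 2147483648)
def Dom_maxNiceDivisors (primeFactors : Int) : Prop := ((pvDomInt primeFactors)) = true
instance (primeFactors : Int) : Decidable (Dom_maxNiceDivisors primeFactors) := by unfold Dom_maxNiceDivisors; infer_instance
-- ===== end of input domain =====

-- B replaces the nearK tuple helper and the while-loop binary exponentiation with a
-- divmod-based early-return chain and a short recursive square-and-multiply helper
-- (objective: simpler; same return value on every int input).

-- ===== PORT A =====
-- helper nearK(n) -> (n2, n3)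
def pvNearK (n : Int) : Int × Int :=
  let n3 := PySem.Int.floordiv n 3
  let nr := PySem.Int.mod n 3
  let p : Int × Int := if nr = 1 ∧ n3 > 0 then (2, n3 - 1) else (0, n3)
  let n2 : Int := if nr = 2 then 1 else p.1
  (n2, p.2)

-- the while-loop of quickPow, state (ret, cur, y); 'if y & 1' tests the bitwise and for nonzero
def pvQuickPowGo (modv ret cur y : Int) : Int :=
  if _h : y > 0 then
    let ret' := if PySem.Int.band y 1 ≠ 0 then PySem.Int.mod (ret * cur) modv else ret
    pvQuickPowGo modv ret' (PySem.Int.mod (cur * cur) modv) (PySem.Int.floordiv y 2)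
  else ret
termination_by y.toNat
decreasing_by
  simp only [PySem.Int.floordiv_eq_ediv_of_pos (by omega : (0:Int) < 2)]
  omega

def maxNiceDivisors (primeFactors : Int) : Int :=
  let p := pvNearK primeFactors
  let n2 := p.1
  let n3 := p.2
  let modv : Int := 10 ^ 9 + 7
  let res := pvQuickPowGo modv 1 3 n3
  let r2 := pvQuickPowGo modv 1 2 n2
  PySem.Int.mod (res * r2) modv

-- ===== PORT B =====
def pvM : Int := 10 ^ 9 + 7

-- _powmod(b, e): recursive square-and-multiply, 1 for e <= 0
def pvPowmod (b e : Int) : Int :=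
  if e ≤ 0 then 1
  else
    let h := pvPowmod (PySem.Int.mod (b * b) pvM) (PySem.Int.floordiv e 2)
    if PySem.Int.mod e 2 ≠ 0 then PySem.Int.mod (h * b) pvM else h
termination_by e.toNat
decreasing_by
  simp only [PySem.Int.floordiv_eq_ediv_of_pos (by omega : (0:Int) < 2)]
  omega

def maxNiceDivisors_alt (primeFactors : Int) : Int :=
  let q := PySem.Int.floordiv primeFactors 3
  let r := PySem.Int.mod primeFactors 3
  if r = 1 ∧ q > 0 then PySem.Int.mod (4 * pvPowmod 3 (q - 1)) pvM
  else if r = 2 then PySem.Int.mod (2 * pvPowmod 3 q) pvM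
  else pvPowmod 3 q

-- ===== PRECONDITION & SPEC =====
def Spec_maxNiceDivisors (primeFactors : Int) (out : Int) : Prop := out = maxNiceDivisors_alt primeFactors
instance (primeFactors : Int) (out : Int) : Decidable (Spec_maxNiceDivisors primeFactors out) := by unfold Spec_maxNiceDivisors; infer_instance

-- ===== CLAIM (what is proved, stated in full; the proofs are below) =====
def Claim_equal_maxNiceDivisors : Prop := ∀ (primeFactors : Int), Dom_maxNiceDivisors primeFactors → Spec_maxNiceDivisors primeFactors (maxNiceDivisors primeFactors)

-- ===== LEMMAS AND PROOFS =====

lemma pvM_pos : (0:Int) < pvM := by norm_num [pvM]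

lemma pvPowmod_eq : ∀ (k : Nat) (e : Int), e.toNat = k → ∀ b,
    pvPowmod b e = if 0 < e then b ^ e.toNat % pvM else 1 := by
  intro k
  induction k using Nat.strong_induction_on with
  | _ k ih =>
    intro e hk b
    rw [pvPowmod]
    by_cases he : e ≤ 0
    · rw [if_pos he, if_neg (by omega : ¬ (0 < e))]
    · have hepos : 0 < e := by omega
      rw [if_neg he, if_pos hepos,
          PySem.Int.floordiv_eq_ediv_of_pos (by omega : (0:Int) < 2),
          PySem.Int.mod_eq_emod_of_pos (by omega : (0:Int) < 2),
          PySem.Int.mod_eq_emod_of_pos pvM_pos]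
      simp only [PySem.Int.mod_eq_emod_of_pos pvM_pos]
      rw [ih (e/2).toNat (by omega) (e/2) rfl (b*b % pvM)]
      by_cases h2 : 0 < e / 2
      · rw [if_pos h2]
        have ht : e.toNat = 2 * (e/2).toNat + (e % 2).toNat := by omega
        have hpow : ((b*b) % pvM) ^ (e/2).toNat % pvM = b ^ (2 * (e/2).toNat) % pvM := by
          rw [Int.ModEq.pow (e/2).toNat (Int.emod_emod_of_dvd (b*b) dvd_rfl)]
          congr 1
          ring
        by_cases hodd : e % 2 = 0
        · rw [if_neg (by omega : ¬ (e % 2 ≠ 0)), hpow, ht, hodd]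
          norm_num
        · have h1 : e % 2 = 1 := by omega
          rw [if_pos (by omega : e % 2 ≠ 0), hpow, ht, h1,
              Int.mul_emod, Int.emod_emod_of_dvd _ dvd_rfl, ← Int.mul_emod]
          norm_num [pow_succ]
      · have he1 : e = 1 := by omega
        subst he1
        norm_num

lemma pvQuickPowGo_eq : ∀ (k : Nat) (y : Int), y.toNat = k → ∀ ret cur,
    pvQuickPowGo pvM ret cur y = if 0 < y then (ret * cur ^ y.toNat) % pvM else ret := by
  intro k
  induction k using Nat.strong_induction_on with
  | _ k ih =>
    intro y hk ret cur
    rw [pvQuickPowGo]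
    by_cases hy : y > 0
    · rw [dif_pos hy, if_pos hy,
          PySem.Int.band_one y,
          PySem.Int.floordiv_eq_ediv_of_pos (by omega : (0:Int) < 2),
          PySem.Int.mod_eq_emod_of_pos (by omega : (0:Int) < 2)]
      simp only [PySem.Int.mod_eq_emod_of_pos pvM_pos]
      set ret' := if y % 2 ≠ 0 then ret * cur % pvM else ret with hret'
      rw [ih (y/2).toNat (by omega) (y/2) rfl ret' (cur * cur % pvM)]
      by_cases h2 : 0 < y / 2
      · rw [if_pos h2]
        have hX : (ret' * (cur*cur % pvM) ^ (y/2).toNat) % pvM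
            = (ret' * (cur*cur) ^ (y/2).toNat) % pvM := by
          rw [Int.mul_emod, Int.ModEq.pow (y/2).toNat (Int.emod_emod_of_dvd (cur*cur) dvd_rfl),
              ← Int.mul_emod]
        rw [hX]
        by_cases hodd : y % 2 = 0
        · have ht : y.toNat = 2 * (y/2).toNat := by omega
          rw [hret', if_neg (by omega : ¬ (y % 2 ≠ 0)), ht]
          congr 1
          ring
        · have ht : y.toNat = 2 * (y/2).toNat + 1 := by omega
          rw [hret', if_pos hodd, ht,
              Int.mul_emod, Int.emod_emod_of_dvd _ dvd_rfl, ← Int.mul_emod]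
          congr 1
          ring
      · have hy1 : y = 1 := by omega
        subst hy1
        norm_num
        rw [hret']
        norm_num
    · rw [dif_neg hy, if_neg (by omega : ¬ (0 < y))]

-- convenient closed forms used by the final proof
lemma pvQuickPow_val (cur y : Int) :
    pvQuickPowGo pvM 1 cur y = if 0 < y then cur ^ y.toNat % pvM else 1 := by
  rw [pvQuickPowGo_eq y.toNat y rfl 1 cur]
  simp

lemma pvPowmod_val (b e : Int) :
    pvPowmod b e = if 0 < e then b ^ e.toNat % pvM else 1 :=
  pvPowmod_eq e.toNat e rfl b

-- ===== VERDICT (by name: the statement is the Claim_ definition above) =====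
theorem maxNiceDivisors_spec : Claim_equal_maxNiceDivisors := by
  unfold Claim_equal_maxNiceDivisors Spec_maxNiceDivisors
  intro pf _
  unfold maxNiceDivisors maxNiceDivisors_alt pvNearK
  rw [show ((10:Int) ^ 9 + 7) = pvM from rfl]
  simp only [pvQuickPow_val, pvPowmod_val, PySem.Int.mod_eq_emod_of_pos pvM_pos]
  set q := PySem.Int.floordiv pf 3 with hq
  set r := PySem.Int.mod pf 3 with hr
  have hr0 : 0 ≤ r := PySem.Int.mod_nonneg pf (by omega : (0:Int) < 3)
  have hr3 : r < 3 := PySem.Int.mod_lt pf (by omega : (0:Int) < 3)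
  have hcases : r = 0 ∨ r = 1 ∨ r = 2 := by omega
  clear_value q r
  rcases hcases with h | h | h <;> subst h
  · -- r = 0
    norm_num
    by_cases hqpos : 0 < q
    · rw [if_pos hqpos]
      exact Int.emod_emod_of_dvd _ dvd_rfl
    · rw [if_neg hqpos]
      norm_num [pvM]
  · -- r = 1
    norm_num
    by_cases hqpos : 0 < q
    · rw [if_pos hqpos, if_pos hqpos]
      rw [if_pos (by norm_num : (0:Int) < 2)]
      by_cases hq1 : 0 < q - 1
      · rw [if_pos hq1, if_pos (by omega : 1 < q),
            show ((2:Int)).toNat = 2 from rfl, show (q - 1).toNat = q.toNat - 1 from by omega,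
            mul_comm]
        norm_num [pvM]
      · rw [if_neg hq1, if_neg (by omega : ¬ 1 < q),
            show ((2:Int)).toNat = 2 from rfl]
        norm_num [pvM]
    · rw [if_neg hqpos, if_neg hqpos]
      simp [hqpos, pvM]
  · -- r = 2
    norm_num
    by_cases hqpos : 0 < q
    · rw [if_pos hqpos, if_pos hqpos,
          show (2:Int) % pvM = 2 from by norm_num [pvM], mul_comm]
    · rw [if_neg hqpos, if_neg hqpos]
      exact Int.emod_emod_of_dvd _ dvd_rfl
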